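-- pv_equiv track=rewrite | github.com/dheeraj-2000/dsalgo | Top Interview Questions/Solutions/Arrays/UnionOfTwoArrays.py | UnionOf2Arrays
-- ===== SOURCE A (Python) =====
-- def UnionOf2Arrays(li1, li2):
--     d1 = {}
--     d2 = {}
--     for ele in li1:
--         d1[ele] = d1.get(ele, 0) + 1
--     for ele in li2:
--         d2[ele] = d2.get(ele, 0) + 1
--     length = len(d1)
--     for ele in d2:
--         if ele not in d1:
--             length += 1
--     return length
-- ===== SOURCE B (Python) =====
-- def UnionOf2Arrays(li1, li2):
--     xs = sorted(li1 + li2)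
--     if not xs:
--         return 0
--     count = 1
--     prev = xs[0]
--     for x in xs[1:]:
--         if x != prev:
--             count += 1
--         prev = x
--     return count
-- ===== Notes on version B (the rewrite author's own statement) =====
-- stated objective: alternative
-- what changed: Replaces A's two frequency dicts plus a membership-comparison pass with sort-then-scan: sort the concatenation and count positions where the value changes from its predecessor.
import Mathlib
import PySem

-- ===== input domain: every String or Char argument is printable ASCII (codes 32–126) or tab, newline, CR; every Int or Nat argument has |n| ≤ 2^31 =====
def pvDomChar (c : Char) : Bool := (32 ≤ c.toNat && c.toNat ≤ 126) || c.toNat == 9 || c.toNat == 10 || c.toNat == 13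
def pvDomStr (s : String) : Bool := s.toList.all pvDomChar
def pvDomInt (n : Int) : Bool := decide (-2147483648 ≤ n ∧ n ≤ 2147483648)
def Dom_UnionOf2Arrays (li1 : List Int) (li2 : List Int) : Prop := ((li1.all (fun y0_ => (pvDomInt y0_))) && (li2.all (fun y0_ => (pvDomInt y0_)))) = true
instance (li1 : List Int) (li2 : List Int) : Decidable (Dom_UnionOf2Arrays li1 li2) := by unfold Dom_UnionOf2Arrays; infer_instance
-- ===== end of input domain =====

-- B replaces A's two frequency dicts and a membership-comparison pass with sort-then-scan (count value changes in the sorted concatenation); objective: alternative.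


-- ===== PORT A =====
def UnionOf2Arrays (li1 : List Int) (li2 : List Int) : Int :=
  let d1 : PySem.Dict Int Int :=
    li1.foldl (fun d ele => d.insert ele (d.getD ele 0 + 1)) PySem.Dict.empty
  let d2 : PySem.Dict Int Int :=
    li2.foldl (fun d ele => d.insert ele (d.getD ele 0 + 1)) PySem.Dict.empty
  let length : Int := PySem.Dict.size d1
  d2.keys.foldl (fun length ele => if d1.contains ele then length else length + 1) length

-- ===== PORT B =====
def UnionOf2Arrays_alt (li1 : List Int) (li2 : List Int) : Int :=
  let xs := PySem.List.sorted (li1 ++ li2) (fun x => x) false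
  match xs with
  | [] => 0
  | x0 :: rest =>
    (rest.foldl (fun (st : Int × Int) x =>
        (if x ≠ st.2 then st.1 + 1 else st.1, x)) (1, x0)).1

-- ===== PRECONDITION & SPEC =====
def Spec_UnionOf2Arrays (li1 : List Int) (li2 : List Int) (out : Int) : Prop := out = UnionOf2Arrays_alt li1 li2
instance (li1 : List Int) (li2 : List Int) (out : Int) : Decidable (Spec_UnionOf2Arrays li1 li2 out) := by unfold Spec_UnionOf2Arrays; infer_instance

-- ===== CLAIM (what is proved, stated in full; the proofs are below) =====
def Claim_equal_UnionOf2Arrays : Prop := ∀ (li1 : List Int) (li2 : List Int), Dom_UnionOf2Arrays li1 li2 → Spec_UnionOf2Arrays li1 li2 (UnionOf2Arrays li1 li2)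

-- ===== LEMMAS AND PROOFS =====

-- A's third loop counts, on top of n, the keys failing the membership test.
theorem foldl_if_count (p : Int → Bool) :
    ∀ (l : List Int) (n : Int),
      l.foldl (fun acc x => if p x then acc else acc + 1) n
        = n + ((l.filter (fun x => !p x)).length : Int) := by
  intro l
  induction l with
  | nil => intro n; simp
  | cons x xs ih =>
    intro n
    by_cases h : p x = true
    · simp [List.filter, h, ih]
    · simp [List.filter, h, ih]; omega

theorem dict_size_eq_keys_length (d : PySem.Dict Int Int) :
    PySem.Dict.size d = ((PySem.Dict.keys d).length : Int) := by
  simp [PySem.Dict.size, PySem.Dict.keys]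

theorem ofList_append (l1 l2 : List Int) :
    PySem.Set.ofList (l1 ++ l2) = PySem.Set.update (PySem.Set.ofList l1) l2 := by
  simp [PySem.Set.ofList_eq_foldl, PySem.Set.update, List.foldl_append]

theorem len_ofList_eq_card (l : List Int) :
    ((PySem.Set.ofList l).length : Int) = (l.toFinset.card : Int) := by
  have hn : (PySem.Set.ofList l).Nodup := PySem.Set.nodup_ofList l
  have : (PySem.Set.ofList l).toFinset = l.toFinset := by
    ext x; simp [PySem.Set.mem_ofList]
  rw [← List.toFinset_card_of_nodup hn, this]

-- A's value is the number of distinct elements of li1 ++ li2.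
theorem portA_eq_card (li1 li2 : List Int) :
    UnionOf2Arrays li1 li2 = ((li1 ++ li2).toFinset.card : Int) := by
  unfold UnionOf2Arrays
  simp only []
  rw [foldl_if_count, dict_size_eq_keys_length,
    PySem.Dict.keys_foldl_insert, PySem.Dict.keys_foldl_insert]
  simp only [PySem.Dict.keys_empty]
  rw [PySem.Set.update_nil_left, PySem.Set.update_nil_left]
  have hfilter :
      (PySem.Set.ofList li2).filter
          (fun x => !(PySem.Dict.contains
            (li1.foldl (fun d ele => d.insert ele (d.getD ele 0 + 1))
              (PySem.Dict.empty : PySem.Dict Int Int)) x))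
        = (PySem.Set.ofList li2).filter
          (fun y => !(PySem.Set.contains (PySem.Set.ofList li1) y)) := by
    apply List.filter_congr
    intro x _
    rw [PySem.Dict.contains_eq_decide_mem_keys, PySem.Dict.keys_foldl_insert]
    simp [PySem.Set.mem_update, PySem.Set.mem_ofList, PySem.Dict.keys_empty]
  rw [hfilter, ← len_ofList_eq_card, ofList_append,
    PySem.Set.update_eq_append_filter]
  simp

-- B's scan over a sorted tail: starting from previous element prev and counter c,
-- the loop adds the number of distinct elements of the tail other than prev.
theorem scan_sorted (rest : List Int) :
    ∀ (prev c : Int), List.Pairwise (· ≤ ·) (prev :: rest) →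
      (rest.foldl (fun (st : Int × Int) x =>
          (if x ≠ st.2 then st.1 + 1 else st.1, x)) (c, prev)).1
        = c + ((rest.toFinset \ {prev}).card : Int) := by
  induction rest with
  | nil => intro prev c _; simp
  | cons y ys ih =>
    intro prev c h
    have hpy : prev ≤ y := (List.pairwise_cons.1 h).1 y (by simp)
    have hys : List.Pairwise (· ≤ ·) (y :: ys) := (List.pairwise_cons.1 h).2
    have hyall : ∀ z ∈ ys, y ≤ z := (List.pairwise_cons.1 hys).1
    by_cases hxy : y = prev
    · subst hxy
      simp only [List.foldl_cons, ne_eq, not_true_eq_false, if_false]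
      rw [ih y c hys]
      congr 2
      rw [List.toFinset_cons, Finset.sdiff_singleton_eq_erase,
        Finset.sdiff_singleton_eq_erase, Finset.erase_insert_eq_erase]
    · have hlt : prev < y := lt_of_le_of_ne hpy (Ne.symm hxy)
      simp only [List.foldl_cons]
      rw [if_pos (by simpa using hxy)]
      rw [ih y (c + 1) hys]
      have hnp : prev ∉ (y :: ys).toFinset := by
        simp only [List.toFinset_cons, Finset.mem_insert, List.mem_toFinset]
        push Not
        exact ⟨Ne.symm (ne_of_gt hlt), fun hz => absurd (hyall prev hz) (not_le.2 hlt)⟩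
      have h1 : (y :: ys).toFinset \ {prev} = (y :: ys).toFinset := by
        rw [Finset.sdiff_singleton_eq_erase, Finset.erase_eq_of_notMem hnp]
      have h2 : insert y ys.toFinset = insert y (ys.toFinset.erase y) := by
        ext z; by_cases hz : z = y <;> simp [hz]
      have h3 : (y :: ys).toFinset.card = (ys.toFinset.erase y).card + 1 := by
        rw [List.toFinset_cons, h2,
          Finset.card_insert_of_notMem (Finset.notMem_erase y _)]
      rw [h1, h3, Finset.sdiff_singleton_eq_erase]
      push_cast
      ring

-- B's value is also the number of distinct elements of li1 ++ li2.
theorem portB_eq_card (li1 li2 : List Int) :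
    UnionOf2Arrays_alt li1 li2 = ((li1 ++ li2).toFinset.card : Int) := by
  unfold UnionOf2Arrays_alt
  have hperm : (PySem.List.sorted (li1 ++ li2) (fun x => x) false).Perm (li1 ++ li2) :=
    PySem.List.sorted_perm _ _ _
  have hpw : (PySem.List.sorted (li1 ++ li2) (fun x => x) false).Pairwise (· ≤ ·) := by
    simpa using PySem.List.sorted_pairwise (xs := li1 ++ li2) (key := fun x => x)
  have htf : (li1 ++ li2).toFinset = (PySem.List.sorted (li1 ++ li2) (fun x => x) false).toFinset := by
    ext z; simp [hperm.mem_iff]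
  cases hxs : PySem.List.sorted (li1 ++ li2) (fun x => x) false with
  | nil =>
    rw [hxs] at htf
    simp only [htf, List.toFinset_nil, Finset.card_empty]
    rfl
  | cons x0 rest =>
    rw [hxs] at htf hpw
    simp only []
    rw [scan_sorted rest x0 1 hpw, htf]
    have h2 : insert x0 rest.toFinset = insert x0 (rest.toFinset.erase x0) := by
      ext z; by_cases hz : z = x0 <;> simp [hz]
    rw [List.toFinset_cons, h2,
      Finset.card_insert_of_notMem (Finset.notMem_erase x0 _),
      Finset.sdiff_singleton_eq_erase]
    push_cast
    ring

-- ===== VERDICT (by name: the statement is the Claim_ definition above) =====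
theorem UnionOf2Arrays_spec : Claim_equal_UnionOf2Arrays := by
  intro li1 li2 _
  unfold Spec_UnionOf2Arrays
  rw [portA_eq_card, portB_eq_card]
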